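-- pv_equiv track=rewrite | github.com/luciansmith/adventOfCode | 2021/day22.py | check50
-- ===== SOURCE A (Python) =====
-- def checkCoor(coor, rules, default):
--     for (toggle, axes) in rules:
--         if coor[0] in axes[0] and coor[1] in axes[1] and coor[2] in axes[2]:
--                 return toggle
--     return default
--
-- def check50(rules, default):
--     ret = 0
--     for x in range(-50, 51):
--         for y in range(-50, 51):
--             for z in range(-50, 51):
--                 if checkCoor((x, y, z), rules, default) == "on":
--                     ret += 1
--     return ret
-- ===== SOURCE B (Python) =====
-- def check50(rules, default):
--     # Coordinate compression per axis: group the 101 coordinate values by their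
--     # membership signature across all rules, then decide each signature
--     # combination once, weighted by the product of group sizes.
--     def groups(axis):
--         sigs = [tuple(v in r[1][axis] for r in rules) for v in range(-50, 51)]
--         uniq = []
--         for s in sigs:
--             if s not in uniq:
--                 uniq.append(s)
--         return [(s, sigs.count(s)) for s in uniq]
--
--     def first_toggle(sx, sy, sz):
--         for i, (toggle, _) in enumerate(rules):
--             if sx[i] and sy[i] and sz[i]:
--                 return toggle
--         return default
--
--     gx, gy, gz = groups(0), groups(1), groups(2)
--     total = 0
--     for sx, nx in gx:
--         for sy, ny in gy:
--             for sz, nz in gz: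
--                 if first_toggle(sx, sy, sz) == "on":
--                     total += nx * ny * nz
--     return total
-- ===== Notes on version B (the rewrite author's own statement) =====
-- stated objective: faster
-- what changed: Instead of querying the first matching rule for each of the 101^3 cells, B compresses each axis into signature classes (which rules' interval lists contain the coordinate), decides each signature triple once and weights it by the product of class sizes.
import Mathlib
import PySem

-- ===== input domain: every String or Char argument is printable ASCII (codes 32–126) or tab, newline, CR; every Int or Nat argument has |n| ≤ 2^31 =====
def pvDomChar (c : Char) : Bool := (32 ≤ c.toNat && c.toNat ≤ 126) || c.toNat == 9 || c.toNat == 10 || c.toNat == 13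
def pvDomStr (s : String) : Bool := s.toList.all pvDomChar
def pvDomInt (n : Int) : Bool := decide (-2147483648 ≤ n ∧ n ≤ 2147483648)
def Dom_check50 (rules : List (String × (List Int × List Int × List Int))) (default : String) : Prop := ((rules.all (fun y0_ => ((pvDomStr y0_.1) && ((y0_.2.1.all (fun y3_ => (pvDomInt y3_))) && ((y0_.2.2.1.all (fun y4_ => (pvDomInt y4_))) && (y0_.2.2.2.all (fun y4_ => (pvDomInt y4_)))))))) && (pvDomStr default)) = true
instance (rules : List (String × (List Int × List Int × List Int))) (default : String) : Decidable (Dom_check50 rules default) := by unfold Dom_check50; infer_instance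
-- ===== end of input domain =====

-- B replaces A's scan of all 101^3 cells by per-axis coordinate compression: coordinates are
-- grouped by their rule-membership signature and each signature triple is decided once, weighted
-- by the product of group sizes (measurably faster when the rule list is short).
set_option maxRecDepth 4000


-- ===== PORT A =====
def checkCoor (coor : Int × Int × Int) (rules : List (String × (List Int × List Int × List Int))) (default : String) : String :=
  match rules with
  | [] => default
  | (toggle, axes) :: rest =>
      if coor.1 ∈ axes.1 ∧ coor.2.1 ∈ axes.2.1 ∧ coor.2.2 ∈ axes.2.2 then toggle
      else checkCoor coor rest default

def check50 (rules : List (String × (List Int × List Int × List Int))) (default : String) : Int :=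
  (PySem.List.pyRange (-50) 51 1).foldl (fun ret x =>
    (PySem.List.pyRange (-50) 51 1).foldl (fun ret y =>
      (PySem.List.pyRange (-50) 51 1).foldl (fun ret z =>
        if checkCoor (x, y, z) rules default = "on" then ret + 1 else ret) ret) ret) 0

-- ===== PORT B =====
-- membership signature of a coordinate value on one axis (one Bool per rule)
def sigList (proj : (List Int × List Int × List Int) → List Int) (rules : List (String × (List Int × List Int × List Int))) (v : Int) : List Bool :=
  rules.map (fun r => decide (v ∈ proj r.2))

-- the `if s not in uniq: uniq.append(s)` loop body
def uniqAdd (uniq : List (List Bool)) (s : List Bool) : List (List Bool) :=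
  if s ∈ uniq then uniq else uniq ++ [s]

-- groups(axis): distinct signatures (first-occurrence order) with their multiplicities
def groups (proj : (List Int × List Int × List Int) → List Int) (rules : List (String × (List Int × List Int × List Int))) : List (List Bool × Int) :=
  let sigs := (PySem.List.pyRange (-50) 51 1).map (sigList proj rules)
  let uniq := sigs.foldl uniqAdd []
  uniq.map (fun s => (s, (sigs.count s : Int)))

-- first_toggle: first rule whose signature bits are all set (walks rules and the three signatures in step)
def firstToggle (rules : List (String × (List Int × List Int × List Int))) (default : String) : List Bool → List Bool → List Bool → String
  | a :: as', b :: bs, c :: cs =>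
      match rules with
      | (t, _) :: rs => if a && b && c then t else firstToggle rs default as' bs cs
      | [] => default
  | _, _, _ => default

def check50_alt (rules : List (String × (List Int × List Int × List Int))) (default : String) : Int :=
  let gx := groups (fun a => a.1) rules
  let gy := groups (fun a => a.2.1) rules
  let gz := groups (fun a => a.2.2) rules
  gx.foldl (fun tot p =>
    gy.foldl (fun tot q =>
      gz.foldl (fun tot r =>
        if firstToggle rules default p.1 q.1 r.1 = "on" then tot + p.2 * q.2 * r.2 else tot) tot) tot) 0

-- ===== PRECONDITION & SPEC =====
def Spec_check50 (rules : List (String × (List Int × List Int × List Int))) (default : String) (out : Int) : Prop := out = check50_alt rules default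
instance (rules : List (String × (List Int × List Int × List Int))) (default : String) (out : Int) : Decidable (Spec_check50 rules default out) := by unfold Spec_check50; infer_instance

-- ===== CLAIM (what is proved, stated in full; the proofs are below) =====
def Claim_equal_check50 : Prop := ∀ (rules : List (String × (List Int × List Int × List Int))) (default : String), Dom_check50 rules default → Spec_check50 rules default (check50 rules default)

-- ===== LEMMAS AND PROOFS =====


-- foldl of "accumulate f" is init + sum
theorem foldl_add_sum {α : Type} (f : α → Int) : ∀ (l : List α) (i : Int), l.foldl (fun a x => a + f x) i = i + (l.map f).sum := by
  intro l; induction l with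
  | nil => simp
  | cons a t ih => intro i; simp [List.foldl_cons, ih, List.map_cons]; ring

-- checkCoor only depends on the coordinates through their signatures
theorem checkCoor_eq_firstToggle (x y z : Int) (default : String) :
    ∀ (rules : List (String × (List Int × List Int × List Int))),
      checkCoor (x, y, z) rules default =
        firstToggle rules default (sigList (fun a => a.1) rules x) (sigList (fun a => a.2.1) rules y) (sigList (fun a => a.2.2) rules z) := by
  intro rules; induction rules with
  | nil => rfl
  | cons r rs ih =>
      obtain ⟨t, axes⟩ := r
      by_cases h : x ∈ axes.1 ∧ y ∈ axes.2.1 ∧ z ∈ axes.2.2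
      · simp [checkCoor, sigList, firstToggle, h.1, h.2.1, h.2.2]
      · have hb : (decide (x ∈ axes.1) && decide (y ∈ axes.2.1) && decide (z ∈ axes.2.2)) = false := by
          simp only [Bool.and_eq_false_iff, decide_eq_false_iff_not]; tauto
        simp [checkCoor, sigList, firstToggle, h, hb, ih]
-- recursive first-occurrence dedup, used only to reason about the foldl form
def uniqRec : List (List Bool) → List (List Bool)
  | [] => []
  | a :: t => a :: uniqRec (t.filter (fun x => x ≠ a))
termination_by l => l.length
decreasing_by simp; exact le_trans (List.length_filter_le _ _) (by simp)

theorem foldl_uniqAdd_eq : ∀ (l : List (List Bool)) (acc : List (List Bool)),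
    l.foldl uniqAdd acc = acc ++ uniqRec (l.filter (fun s => s ∉ acc)) := by
  intro l; induction l with
  | nil => intro acc; simp [uniqRec]
  | cons a t ih =>
      intro acc
      by_cases h : a ∈ acc
      · rw [List.foldl_cons]
        have h1 : uniqAdd acc a = acc := by simp [uniqAdd, h]
        rw [h1, ih acc]
        congr 2
        simp [h]
      · rw [List.foldl_cons]
        have h1 : uniqAdd acc a = acc ++ [a] := by simp [uniqAdd, h]
        rw [h1, ih (acc ++ [a])]
        have h2 : (a :: t).filter (fun s => s ∉ acc) = a :: t.filter (fun s => s ∉ acc) := by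
          simp [h]
        rw [h2]
        have h3 : uniqRec (a :: t.filter (fun s => s ∉ acc)) = a :: uniqRec ((t.filter (fun s => s ∉ acc)).filter (fun x => x ≠ a)) := by
          simp [uniqRec]
        rw [h3]
        have h4 : (t.filter (fun s => s ∉ acc)).filter (fun x => x ≠ a) = t.filter (fun s => s ∉ acc ++ [a]) := by
          rw [List.filter_filter]
          apply List.filter_congr
          intro x _
          simp [List.mem_append, and_comm, not_or]
        rw [h4]; simp
theorem uniqRec_subset : ∀ (l : List (List Bool)), uniqRec l ⊆ l := by
  intro l
  induction hn : l.length using Nat.strong_induction_on generalizing l with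
  | _ n ih =>
    match l with
    | [] => simp [uniqRec]
    | a :: t =>
      rw [show uniqRec (a :: t) = a :: uniqRec (t.filter (fun x => x ≠ a)) from by simp [uniqRec]]
      intro s hs
      rcases List.mem_cons.1 hs with h | h
      · simp [h]
      · have hlen : (t.filter (fun x => x ≠ a)).length < n := by
          subst hn; simp; exact List.length_filter_le _ _
        have := ih _ hlen (t.filter (fun x => x ≠ a)) rfl h
        exact List.mem_cons_of_mem _ (List.mem_of_mem_filter this)
-- the grouped weighted sum equals the plain sum
theorem sum_filter_ne (a : List Bool) (f : List Bool → Int) : ∀ (t : List (List Bool)),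
    (t.map f).sum = (t.count a : Int) * f a + ((t.filter (fun x => x ≠ a)).map f).sum := by
  intro t; induction t with
  | nil => simp
  | cons b u ih =>
      by_cases h : b = a
      · subst h
        simp [List.count_cons_self, ih]
        ring
      · have : a ≠ b := fun hh => h hh.symm
        simp [h, ih]
        ring
theorem grouped_sum (f : List Bool → Int) : ∀ (l : List (List Bool)),
    ((uniqRec l).map (fun s => (l.count s : Int) * f s)).sum = (l.map f).sum := by
  intro l
  induction hn : l.length using Nat.strong_induction_on generalizing l with
  | _ n ih =>
    match l with
    | [] => simp [uniqRec]
    | a :: t =>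
      rw [show uniqRec (a :: t) = a :: uniqRec (t.filter (fun x => x ≠ a)) from by simp [uniqRec]]
      have hlen : (t.filter (fun x => x ≠ a)).length < n := by
        subst hn; simp; exact List.length_filter_le _ _
      have hcong : (uniqRec (t.filter (fun x => x ≠ a))).map (fun s => ((a :: t).count s : Int) * f s)
          = (uniqRec (t.filter (fun x => x ≠ a))).map (fun s => ((t.filter (fun x => x ≠ a)).count s : Int) * f s) := by
        apply List.map_congr_left
        intro s hs
        have hmem := uniqRec_subset _ hs
        have hne : s ≠ a := by
          have := List.of_mem_filter hmem; simpa using this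
        have h1 : (a :: t).count s = t.count s := List.count_cons_of_ne hne.symm |>.trans rfl
        have h2 : (t.filter (fun x => x ≠ a)).count s = t.count s := by
          rw [List.count_filter]; simp [hne]
        rw [h1, h2]
      rw [List.map_cons, List.sum_cons, hcong, ih _ hlen _ rfl]
      rw [List.count_cons_self, List.map_cons, List.sum_cons, sum_filter_ne a f t]
      push_cast; ring
-- groups-level corollary
theorem groups_sum (proj : (List Int × List Int × List Int) → List Int) (rules : List (String × (List Int × List Int × List Int))) (f : List Bool → Int) :
    ((groups proj rules).map (fun p => p.2 * f p.1)).sum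
      = ((PySem.List.pyRange (-50) 51 1).map (fun v => f (sigList proj rules v))).sum := by
  unfold groups
  simp only [List.map_map]
  have h0 : ((PySem.List.pyRange (-50) 51 1).map (sigList proj rules)).foldl uniqAdd []
      = uniqRec ((PySem.List.pyRange (-50) 51 1).map (sigList proj rules)) := by
    rw [foldl_uniqAdd_eq]; simp
  rw [h0]
  have := grouped_sum f ((PySem.List.pyRange (-50) 51 1).map (sigList proj rules))
  simp only [List.map_map] at this ⊢
  rw [show ((fun p : List Bool × Int => p.2 * f p.1) ∘ fun s => (s, ((((PySem.List.pyRange (-50) 51 1).map (sigList proj rules)).count s : Nat) : Int)))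
      = fun s => ((((PySem.List.pyRange (-50) 51 1).map (sigList proj rules)).count s : Nat) : Int) * f s from rfl]
  exact this

theorem sum_congr' {α : Type} (l : List α) {f g : α → Int} (h : ∀ x ∈ l, f x = g x) : (l.map f).sum = (l.map g).sum := by
  rw [List.map_congr_left h]

-- one compression level: a guarded constant times multiplicity
theorem groups_ite_sum (proj : (List Int × List Int × List Int) → List Int) (rules : List (String × (List Int × List Int × List Int))) (C : List Bool → Prop) [DecidablePred C] (K : Int) :
    ((groups proj rules).map (fun p => if C p.1 then K * p.2 else 0)).sum
      = K * ((PySem.List.pyRange (-50) 51 1).map (fun v => if C (sigList proj rules v) then (1:Int) else 0)).sum := by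
  calc ((groups proj rules).map (fun p => if C p.1 then K * p.2 else 0)).sum
      = ((groups proj rules).map (fun p => p.2 * (if C p.1 then K else 0))).sum := by
        apply sum_congr'; intro p _; by_cases h : C p.1 <;> simp [h]; ring
    _ = ((PySem.List.pyRange (-50) 51 1).map (fun v => if C (sigList proj rules v) then K else 0)).sum := groups_sum proj rules (fun s => if C s then K else 0)
    _ = ((PySem.List.pyRange (-50) 51 1).map (fun v => K * (if C (sigList proj rules v) then (1:Int) else 0))).sum := by
        apply sum_congr'; intro v _; by_cases h : C (sigList proj rules v) <;> simp [h]
    _ = K * ((PySem.List.pyRange (-50) 51 1).map (fun v => if C (sigList proj rules v) then (1:Int) else 0)).sum := List.sum_map_mul_left _ _ _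

-- one compression level: a constant times multiplicity times a signature-dependent sum
theorem groups_mul_sum (proj : (List Int × List Int × List Int) → List Int) (rules : List (String × (List Int × List Int × List Int))) (K : Int) (g : List Bool → Int) :
    ((groups proj rules).map (fun q => K * q.2 * g q.1)).sum
      = K * ((PySem.List.pyRange (-50) 51 1).map (fun v => g (sigList proj rules v))).sum := by
  calc ((groups proj rules).map (fun q => K * q.2 * g q.1)).sum
      = ((groups proj rules).map (fun q => q.2 * (K * g q.1))).sum := by
        apply sum_congr'; intro q _; ring
    _ = ((PySem.List.pyRange (-50) 51 1).map (fun v => K * g (sigList proj rules v))).sum := groups_sum proj rules (fun s => K * g s)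
    _ = K * ((PySem.List.pyRange (-50) 51 1).map (fun v => g (sigList proj rules v))).sum := List.sum_map_mul_left _ _ _

theorem check50_eq_sum (rules : List (String × (List Int × List Int × List Int))) (default : String) :
    check50 rules default = ((PySem.List.pyRange (-50) 51 1).map (fun x =>
      ((PySem.List.pyRange (-50) 51 1).map (fun y =>
        ((PySem.List.pyRange (-50) 51 1).map (fun z =>
          if checkCoor (x, y, z) rules default = "on" then (1:Int) else 0)).sum)).sum)).sum := by
  unfold check50
  have hz : ∀ (x y : Int) (i : Int),
      (PySem.List.pyRange (-50) 51 1).foldl (fun ret z => if checkCoor (x, y, z) rules default = "on" then ret + 1 else ret) i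
        = i + ((PySem.List.pyRange (-50) 51 1).map (fun z => if checkCoor (x, y, z) rules default = "on" then (1:Int) else 0)).sum := by
    intro x y i
    rw [show (fun (ret : Int) z => if checkCoor (x, y, z) rules default = "on" then ret + 1 else ret)
        = (fun (ret : Int) z => ret + (if checkCoor (x, y, z) rules default = "on" then (1:Int) else 0)) from by
      funext r zz; by_cases h : checkCoor (x, y, zz) rules default = "on" <;> simp [h]]
    exact foldl_add_sum _ _ _
  have hy : ∀ (x : Int) (i : Int),
      (PySem.List.pyRange (-50) 51 1).foldl (fun ret y =>
        (PySem.List.pyRange (-50) 51 1).foldl (fun ret z => if checkCoor (x, y, z) rules default = "on" then ret + 1 else ret) ret) i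
        = i + ((PySem.List.pyRange (-50) 51 1).map (fun y =>
            ((PySem.List.pyRange (-50) 51 1).map (fun z => if checkCoor (x, y, z) rules default = "on" then (1:Int) else 0)).sum)).sum := by
    intro x i
    rw [show (fun (ret : Int) y =>
        (PySem.List.pyRange (-50) 51 1).foldl (fun ret z => if checkCoor (x, y, z) rules default = "on" then ret + 1 else ret) ret)
        = (fun (ret : Int) y => ret + ((PySem.List.pyRange (-50) 51 1).map (fun z => if checkCoor (x, y, z) rules default = "on" then (1:Int) else 0)).sum) from by
      funext r yy; exact hz x yy r]
    exact foldl_add_sum _ _ _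
  rw [show (fun (ret : Int) x =>
      (PySem.List.pyRange (-50) 51 1).foldl (fun ret y =>
        (PySem.List.pyRange (-50) 51 1).foldl (fun ret z => if checkCoor (x, y, z) rules default = "on" then ret + 1 else ret) ret) ret)
      = (fun (ret : Int) x => ret + ((PySem.List.pyRange (-50) 51 1).map (fun y =>
          ((PySem.List.pyRange (-50) 51 1).map (fun z => if checkCoor (x, y, z) rules default = "on" then (1:Int) else 0)).sum)).sum) from by
    funext r xx; exact hy xx r]
  rw [foldl_add_sum]; ring

theorem check50_alt_eq_sum (rules : List (String × (List Int × List Int × List Int))) (default : String) :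
    check50_alt rules default = ((groups (fun a => a.1) rules).map (fun p =>
      ((groups (fun a => a.2.1) rules).map (fun q =>
        ((groups (fun a => a.2.2) rules).map (fun r =>
          if firstToggle rules default p.1 q.1 r.1 = "on" then p.2 * q.2 * r.2 else 0)).sum)).sum)).sum := by
  simp only [check50_alt]
  have hz : ∀ (p q : List Bool × Int) (i : Int),
      (groups (fun a => a.2.2) rules).foldl (fun tot r =>
        if firstToggle rules default p.1 q.1 r.1 = "on" then tot + p.2 * q.2 * r.2 else tot) i
        = i + ((groups (fun a => a.2.2) rules).map (fun r =>
            if firstToggle rules default p.1 q.1 r.1 = "on" then p.2 * q.2 * r.2 else 0)).sum := by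
    intro p q i
    rw [show (fun (tot : Int) (r : List Bool × Int) =>
        if firstToggle rules default p.1 q.1 r.1 = "on" then tot + p.2 * q.2 * r.2 else tot)
        = (fun (tot : Int) r => tot + (if firstToggle rules default p.1 q.1 r.1 = "on" then p.2 * q.2 * r.2 else 0)) from by
      funext t r; by_cases h : firstToggle rules default p.1 q.1 r.1 = "on" <;> simp [h]]
    exact foldl_add_sum _ _ _
  have hy : ∀ (p : List Bool × Int) (i : Int),
      (groups (fun a => a.2.1) rules).foldl (fun tot q =>
        (groups (fun a => a.2.2) rules).foldl (fun tot r =>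
          if firstToggle rules default p.1 q.1 r.1 = "on" then tot + p.2 * q.2 * r.2 else tot) tot) i
        = i + ((groups (fun a => a.2.1) rules).map (fun q =>
            ((groups (fun a => a.2.2) rules).map (fun r =>
              if firstToggle rules default p.1 q.1 r.1 = "on" then p.2 * q.2 * r.2 else 0)).sum)).sum := by
    intro p i
    rw [show (fun (tot : Int) (q : List Bool × Int) =>
        (groups (fun a => a.2.2) rules).foldl (fun tot r =>
          if firstToggle rules default p.1 q.1 r.1 = "on" then tot + p.2 * q.2 * r.2 else tot) tot)
        = (fun (tot : Int) (q : List Bool × Int) => tot + ((groups (fun a => a.2.2) rules).map (fun r =>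
            if firstToggle rules default p.1 q.1 r.1 = "on" then p.2 * q.2 * r.2 else 0)).sum) from by
      funext t q; exact hz p q t]
    exact foldl_add_sum _ _ _
  rw [show (fun (tot : Int) (p : List Bool × Int) =>
      (groups (fun a => a.2.1) rules).foldl (fun tot q =>
        (groups (fun a => a.2.2) rules).foldl (fun tot r =>
          if firstToggle rules default p.1 q.1 r.1 = "on" then tot + p.2 * q.2 * r.2 else tot) tot) tot)
      = (fun (tot : Int) (p : List Bool × Int) => tot + ((groups (fun a => a.2.1) rules).map (fun q =>
          ((groups (fun a => a.2.2) rules).map (fun r =>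
            if firstToggle rules default p.1 q.1 r.1 = "on" then p.2 * q.2 * r.2 else 0)).sum)).sum) from by
    funext t p; exact hy p t]
  rw [foldl_add_sum]; ring

theorem check50_eq_alt (rules : List (String × (List Int × List Int × List Int))) (default : String) :
    check50 rules default = check50_alt rules default := by
  rw [check50_eq_sum, check50_alt_eq_sum]
  symm
  calc ((groups (fun a => a.1) rules).map (fun p =>
        ((groups (fun a => a.2.1) rules).map (fun q =>
          ((groups (fun a => a.2.2) rules).map (fun r =>
            if firstToggle rules default p.1 q.1 r.1 = "on" then p.2 * q.2 * r.2 else 0)).sum)).sum)).sum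
      -- compress the z axis
      = ((groups (fun a => a.1) rules).map (fun p =>
        ((groups (fun a => a.2.1) rules).map (fun q =>
          (p.2 * q.2) * ((PySem.List.pyRange (-50) 51 1).map (fun v =>
            if firstToggle rules default p.1 q.1 (sigList (fun a => a.2.2) rules v) = "on" then (1:Int) else 0)).sum)).sum)).sum := by
        apply sum_congr'; intro p _; apply sum_congr'; intro q _
        exact groups_ite_sum (fun a => a.2.2) rules (fun s => firstToggle rules default p.1 q.1 s = "on") (p.2 * q.2)
      -- compress the y axis
    _ = ((groups (fun a => a.1) rules).map (fun p =>
        p.2 * ((PySem.List.pyRange (-50) 51 1).map (fun w =>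
          ((PySem.List.pyRange (-50) 51 1).map (fun v =>
            if firstToggle rules default p.1 (sigList (fun a => a.2.1) rules w) (sigList (fun a => a.2.2) rules v) = "on" then (1:Int) else 0)).sum)).sum)).sum := by
        apply sum_congr'; intro p _
        exact groups_mul_sum (fun a => a.2.1) rules p.2 (fun s =>
          ((PySem.List.pyRange (-50) 51 1).map (fun v =>
            if firstToggle rules default p.1 s (sigList (fun a => a.2.2) rules v) = "on" then (1:Int) else 0)).sum)
      -- compress the x axis
    _ = ((PySem.List.pyRange (-50) 51 1).map (fun u =>
        ((PySem.List.pyRange (-50) 51 1).map (fun w =>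
          ((PySem.List.pyRange (-50) 51 1).map (fun v =>
            if firstToggle rules default (sigList (fun a => a.1) rules u) (sigList (fun a => a.2.1) rules w) (sigList (fun a => a.2.2) rules v) = "on" then (1:Int) else 0)).sum)).sum)).sum := by
        have h := groups_mul_sum (fun a => a.1) rules 1 (fun s =>
          ((PySem.List.pyRange (-50) 51 1).map (fun w =>
            ((PySem.List.pyRange (-50) 51 1).map (fun v =>
              if firstToggle rules default s (sigList (fun a => a.2.1) rules w) (sigList (fun a => a.2.2) rules v) = "on" then (1:Int) else 0)).sum)).sum)
        rw [one_mul] at h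
        rw [← h]
        apply sum_congr'; intro p _; ring
      -- identify with the brute-force triple sum
    _ = ((PySem.List.pyRange (-50) 51 1).map (fun x =>
        ((PySem.List.pyRange (-50) 51 1).map (fun y =>
          ((PySem.List.pyRange (-50) 51 1).map (fun z =>
            if checkCoor (x, y, z) rules default = "on" then (1:Int) else 0)).sum)).sum)).sum := by
        apply sum_congr'; intro x _; apply sum_congr'; intro y _; apply sum_congr'; intro z _
        rw [checkCoor_eq_firstToggle]

-- ===== VERDICT (by name: the statement is the Claim_ definition above) =====
theorem check50_spec : Claim_equal_check50 := by
  intro rules default _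
  show check50 rules default = check50_alt rules default
  exact check50_eq_alt rules default
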